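-- pv_equiv track=rewrite | github.com/cola0405/leetcode | hash/lcp66.py | minNumBooths
-- ===== SOURCE A (Python) =====
-- from typing import List
--
-- def minNumBooths(demand: List[str]) -> int:
--     from collections import defaultdict, Counter
--     min_demand = defaultdict(int)
--     for stages in demand:
--         count = Counter(stages)
--         for booth in count:
--             min_demand[booth] = max(min_demand[booth], count[booth])
--     return sum(min_demand.values())
-- ===== SOURCE B (Python) =====
-- def minNumBooths(demand):
--     # Different decomposition: first gather the set of distinct characters,
--     # then for each character scan every string for its count and sum the maxima.
--     chars = set()
--     for s in demand:
--         chars.update(s)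
--     total = 0
--     for c in chars:
--         best = 0
--         for s in demand:
--             cnt = 0
--             for ch in s:
--                 if ch == c:
--                     cnt += 1
--             best = max(best, cnt)
--         total += best
--     return total
-- ===== Notes on version B (the rewrite author's own statement) =====
-- stated objective: alternative
-- what changed: Instead of building a per-string Counter and max-merging it into a dict in one pass, B first collects the set of distinct characters and then, per character, scans every string counting its occurrences and sums the per-character maxima (the sum is order-independent, so set iteration is safe).
import Mathlib
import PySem

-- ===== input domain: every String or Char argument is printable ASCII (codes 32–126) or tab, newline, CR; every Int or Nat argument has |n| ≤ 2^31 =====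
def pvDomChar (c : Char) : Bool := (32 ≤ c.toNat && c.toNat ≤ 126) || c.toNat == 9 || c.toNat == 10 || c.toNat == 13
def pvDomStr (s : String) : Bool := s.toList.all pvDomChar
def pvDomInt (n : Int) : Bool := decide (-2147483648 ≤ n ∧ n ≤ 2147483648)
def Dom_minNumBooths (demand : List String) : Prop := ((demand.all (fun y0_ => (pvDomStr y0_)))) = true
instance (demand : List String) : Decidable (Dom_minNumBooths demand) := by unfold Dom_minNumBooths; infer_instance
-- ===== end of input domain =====

-- B (minNumBooths_alt) gathers the distinct characters first and then scans every string per
-- character, instead of A's per-string Counter max-merged into a dict; return values only.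

-- ===== PORT A =====
-- for stages in demand: count = Counter(stages); for booth in count: min_demand[booth] = max(min_demand[booth], count[booth])
def minNumBooths (demand : List String) : Int :=
  let min_demand : PySem.Dict Char Int :=
    demand.foldl
      (fun md stages =>
        let count := PySem.Dict.counter stages.toList
        count.keys.foldl
          (fun md booth => md.insert booth (max (md.getD booth 0) (count.getD booth 0)))
          md)
      PySem.Dict.empty
  min_demand.values.sum

-- ===== PORT B =====
-- chars = set(); for s in demand: chars.update(s); then per character count each string and sum the maxima
def minNumBooths_alt (demand : List String) : Int :=
  let chars : PySem.Set Char :=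
    demand.foldl (fun st s => PySem.Set.update st s.toList) PySem.Set.empty
  chars.foldl
    (fun total c =>
      total +
        demand.foldl
          (fun best s =>
            max best (s.toList.foldl (fun cnt ch => if ch == c then cnt + 1 else cnt) 0))
          0)
    0

-- ===== PRECONDITION & SPEC =====
def Spec_minNumBooths (demand : List String) (out : Int) : Prop := out = minNumBooths_alt demand
instance (demand : List String) (out : Int) : Decidable (Spec_minNumBooths demand out) := by unfold Spec_minNumBooths; infer_instance

-- ===== CLAIM (what is proved, stated in full; the proofs are below) =====
def Claim_equal_minNumBooths : Prop := ∀ (demand : List String), Dom_minNumBooths demand → Spec_minNumBooths demand (minNumBooths demand)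

-- ===== LEMMAS AND PROOFS =====

-- updating with an already-deduplicated update list gives the same set as updating with the raw list
theorem pv_update_update (l : List Char) : ∀ (t st : PySem.Set Char),
    PySem.Set.update st (PySem.Set.update t l) = PySem.Set.update (PySem.Set.update st t) l := by
  induction l with
  | nil => intro t st; simp [PySem.Set.update_nil]
  | cons x l ih =>
      intro t st
      rw [PySem.Set.update_cons, PySem.Set.update_cons, ih (PySem.Set.add t x) st]
      congr 1
      by_cases hx : x ∈ t
      · rw [PySem.Set.add_of_mem hx, PySem.Set.add_of_mem]
        exact (PySem.Set.mem_update _ _ _).2 (Or.inr hx)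
      · rw [PySem.Set.add_of_not_mem hx, PySem.Set.update_append, PySem.Set.update_cons,
            PySem.Set.update_nil]

-- B's character-collecting loop is one update by the concatenation
theorem pv_chars_eq (demand : List String) : ∀ st : PySem.Set Char,
    demand.foldl (fun st s => PySem.Set.update st s.toList) st
      = PySem.Set.update st (demand.flatMap String.toList) := by
  induction demand with
  | nil => intro st; simp [PySem.Set.update_nil]
  | cons s demand ih =>
      intro st
      rw [List.foldl_cons, ih, List.flatMap_cons, PySem.Set.update_append]

-- A's inner loop over the distinct keys of one Counter, lookup-characterised
theorem pv_inner_getD (g : Char → Int) (ks : List Char) : ∀ (md : PySem.Dict Char Int),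
    ks.Nodup → ∀ c,
    (ks.foldl (fun md b => md.insert b (max (md.getD b 0) (g b))) md).getD c 0
      = if c ∈ ks then max (md.getD c 0) (g c) else md.getD c 0 := by
  induction ks with
  | nil => intro md _ c; simp
  | cons x ks ih =>
      intro md hnd c
      obtain ⟨hx, hnd'⟩ := List.nodup_cons.mp hnd
      rw [List.foldl_cons, ih _ hnd' c]
      by_cases hc : c ∈ ks
      · have hcx : c ≠ x := fun h => hx (h ▸ hc)
        simp [hc, hcx, PySem.Dict.getD_insert]
      · by_cases hce : c = x
        · subst hce
          simp [hc]
        · simp [hc, hce, PySem.Dict.getD_insert]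

-- A's outer loop: keys are the running character set, values the running per-character maxima
theorem pv_outer (demand : List String) : ∀ (md : PySem.Dict Char Int),
    md.keys.Nodup → (∀ c, 0 ≤ md.getD c 0) →
    (demand.foldl
      (fun md stages =>
        let count := PySem.Dict.counter stages.toList
        count.keys.foldl
          (fun md booth => md.insert booth (max (md.getD booth 0) (count.getD booth 0)))
          md)
      md).keys = PySem.Set.update md.keys (demand.flatMap String.toList)
    ∧ (demand.foldl
      (fun md stages =>
        let count := PySem.Dict.counter stages.toList
        count.keys.foldl
          (fun md booth => md.insert booth (max (md.getD booth 0) (count.getD booth 0)))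
          md)
      md).keys.Nodup
    ∧ ∀ c,
    (demand.foldl
      (fun md stages =>
        let count := PySem.Dict.counter stages.toList
        count.keys.foldl
          (fun md booth => md.insert booth (max (md.getD booth 0) (count.getD booth 0)))
          md)
      md).getD c 0
      = demand.foldl (fun m s => max m ((s.toList.count c : Int))) (md.getD c 0) := by
  induction demand with
  | nil => intro md hnd _; exact ⟨(PySem.Set.update_nil md.keys).symm, hnd, fun c => rfl⟩
  | cons s demand ih =>
      intro md hnd hpos
      set cnt := PySem.Dict.counter s.toList with hcnt
      set md1 := cnt.keys.foldl
          (fun md booth => md.insert booth (max (md.getD booth 0) (cnt.getD booth 0))) md with hmd1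
      have hkeys1 : md1.keys = PySem.Set.update md.keys s.toList := by
        rw [hmd1, PySem.Dict.keys_foldl_insert, hcnt, PySem.Dict.keys_counter]
        have := pv_update_update s.toList PySem.Set.empty md.keys
        simpa [PySem.Set.ofList, PySem.Set.update, PySem.Set.empty] using this
      have hnd1 : md1.keys.Nodup := PySem.Dict.nodup_keys_foldl_insert _ _ _ hnd
      have hget1 : ∀ c, md1.getD c 0 = max (md.getD c 0) ((s.toList.count c : Int)) := by
        intro c
        rw [hmd1, pv_inner_getD _ _ _ (PySem.Dict.nodup_keys_counter _)]
        by_cases hc : c ∈ cnt.keys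
        · have := PySem.Dict.getD_counter (xs := s.toList) (v := c)
          rw [if_pos hc, hcnt, this]
        · have hcs : c ∉ s.toList := by
            intro h
            exact hc (by rw [hcnt, PySem.Dict.keys_counter]; exact (PySem.Set.mem_ofList _ _).2 h)
          rw [if_neg hc, List.count_eq_zero_of_not_mem hcs]
          simp [max_eq_left (hpos c)]
      have hpos1 : ∀ c, 0 ≤ md1.getD c 0 := by
        intro c; rw [hget1 c]; exact le_trans (hpos c) (le_max_left _ _)
      obtain ⟨hk, hn, hg⟩ := ih md1 hnd1 hpos1
      refine ⟨?_, hn, ?_⟩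
      · rw [List.foldl_cons, ← hmd1, hk, hkeys1, List.flatMap_cons, PySem.Set.update_append]
      · intro c
        rw [List.foldl_cons, ← hmd1, hg c, hget1 c, List.foldl_cons]

-- B's per-character counting loop is List.count
theorem pv_bcount (c : Char) (s : String) :
    s.toList.foldl (fun cnt ch => if ch == c then cnt + 1 else cnt) 0
      = ((s.toList.count c : Int)) := by
  simpa using PySem.List.foldl_beq_add_one (l := s.toList) (v := c) (a := (0 : Int))

-- ===== VERDICT (by name: the statement is the Claim_ definition above) =====
theorem minNumBooths_spec : Claim_equal_minNumBooths := by
  intro demand _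
  unfold Spec_minNumBooths minNumBooths minNumBooths_alt
  simp only []
  obtain ⟨hk, hn, hg⟩ := pv_outer demand PySem.Dict.empty (by simp) (by simp)
  rw [PySem.Dict.values_eq_map_keys _ hn 0, hk]
  rw [pv_chars_eq demand PySem.Set.empty]
  rw [PySem.List.foldl_add (g := fun c =>
    demand.foldl (fun best s =>
      max best (s.toList.foldl (fun cnt ch => if ch == c then cnt + 1 else cnt) 0)) 0)]
  have hempty : (PySem.Dict.empty : PySem.Dict Char Int).keys = PySem.Set.empty := rfl
  rw [hempty, zero_add]
  refine congrArg List.sum (List.map_congr_left ?_)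
  intro c _
  rw [hg c]
  have h0 : (PySem.Dict.empty : PySem.Dict Char Int).getD c 0 = 0 := rfl
  rw [h0]
  exact PySem.List.foldl_congr_mem demand _ _ _ (fun acc x _ => by rw [pv_bcount c x])
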